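-- pv_equiv track=rewrite | github.com/LalithNarayanan/codespectre_backend | mf_modernization/Services2.py | compare_md_cobol_2d
-- ===== SOURCE A (Python) =====
-- def compare_md_cobol_2d(md_data, cobol_data):
--     """Compare markdown and COBOL data - Mainframe specific"""
--     def norm(s):
--         return s.strip().upper()
--
--     md_set = set((fn, para) for fn, para in md_data)
--     cobol_set = set((fn, para) for fn, para in cobol_data)
--     both = md_set & cobol_set
--
--     md_only = md_set - cobol_set
--     cobol_only = cobol_set - md_set
--
--     return {
--         "matched": sorted(list(both)),
--         "only_in_md": sorted(list(md_only)),
--         "only_in_cobol": sorted(list(cobol_only))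
--     }
-- ===== SOURCE B (Python) =====
-- def compare_md_cobol_2d(md_data, cobol_data):
--     """Compare markdown and COBOL data - one classifying pass over a flag dict
--     instead of building two sets and taking three set operations."""
--     flags = {}
--     for fn, para in md_data:
--         flags[(fn, para)] = (True, False)
--     for fn, para in cobol_data:
--         in_md = flags.get((fn, para), (False, False))[0]
--         flags[(fn, para)] = (in_md, True)
--     matched, only_md, only_cobol = [], [], []
--     for pair, (in_md, in_cobol) in flags.items():
--         if in_md and in_cobol:
--             matched.append(pair)
--         elif in_md:
--             only_md.append(pair)
--         else:
--             only_cobol.append(pair)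
--     return {
--         "matched": sorted(matched),
--         "only_in_md": sorted(only_md),
--         "only_in_cobol": sorted(only_cobol),
--     }
-- ===== Notes on version B (the rewrite author's own statement) =====
-- stated objective: alternative
-- what changed: Replaces the two set() builds plus three set operations (&, -, -) by a single flag dictionary filled in one pass over each input and then walked once, classifying every pair into matched / only_in_md / only_in_cobol in a single sweep.
import Mathlib
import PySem

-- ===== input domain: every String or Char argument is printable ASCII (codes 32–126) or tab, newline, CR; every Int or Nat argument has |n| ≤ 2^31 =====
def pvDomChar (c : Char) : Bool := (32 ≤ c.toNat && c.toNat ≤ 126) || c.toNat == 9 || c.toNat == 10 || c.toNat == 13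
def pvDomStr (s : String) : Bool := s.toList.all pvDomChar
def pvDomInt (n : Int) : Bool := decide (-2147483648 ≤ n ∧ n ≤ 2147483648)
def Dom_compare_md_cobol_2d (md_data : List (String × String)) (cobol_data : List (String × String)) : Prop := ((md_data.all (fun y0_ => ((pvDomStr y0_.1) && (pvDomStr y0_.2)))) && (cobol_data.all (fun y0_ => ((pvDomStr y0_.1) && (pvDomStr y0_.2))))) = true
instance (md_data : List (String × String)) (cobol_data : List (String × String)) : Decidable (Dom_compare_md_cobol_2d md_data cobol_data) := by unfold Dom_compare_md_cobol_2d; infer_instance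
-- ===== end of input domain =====

-- B replaces A's two set() builds and three set operations by a single flag
-- dictionary filled in one pass per input and walked once, classifying each
-- pair into matched / only_in_md / only_in_cobol (objective: alternative).

-- ===== PORT A =====
def compare_md_cobol_2d (md_data : List (String × String)) (cobol_data : List (String × String)) : List (String × List (String × String)) :=
  let md_set : PySem.Set (String × String) := PySem.Set.ofList md_data
  let cobol_set : PySem.Set (String × String) := PySem.Set.ofList cobol_data
  let both := PySem.Set.inter md_set cobol_set
  let md_only := PySem.Set.diff md_set cobol_set
  let cobol_only := PySem.Set.diff cobol_set md_set
  [("matched", PySem.List.sorted2 both (·.1) (·.2)),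
   ("only_in_md", PySem.List.sorted2 md_only (·.1) (·.2)),
   ("only_in_cobol", PySem.List.sorted2 cobol_only (·.1) (·.2))]

-- ===== PORT B =====
def compare_md_cobol_2d_alt (md_data : List (String × String)) (cobol_data : List (String × String)) : List (String × List (String × String)) :=
  -- flags[(fn, para)] = (True, False) for every md row
  let flags1 : PySem.Dict (String × String) (Bool × Bool) :=
    md_data.foldl (fun d p => d.insert p (true, false)) PySem.Dict.empty
  -- flags[(fn, para)] = (flags.get((fn, para), (False, False))[0], True) for every cobol row
  let flags : PySem.Dict (String × String) (Bool × Bool) :=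
    cobol_data.foldl (fun d p => d.insert p ((d.getD p (false, false)).1, true)) flags1
  -- one classifying sweep over flags.items()
  let acc : List (String × String) × List (String × String) × List (String × String) :=
    flags.items.foldl
      (fun acc kv =>
        if kv.2.1 && kv.2.2 then (acc.1 ++ [kv.1], acc.2.1, acc.2.2)
        else if kv.2.1 then (acc.1, acc.2.1 ++ [kv.1], acc.2.2)
        else (acc.1, acc.2.1, acc.2.2 ++ [kv.1]))
      ([], [], [])
  [("matched", PySem.List.sorted2 acc.1 (·.1) (·.2)),
   ("only_in_md", PySem.List.sorted2 acc.2.1 (·.1) (·.2)),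
   ("only_in_cobol", PySem.List.sorted2 acc.2.2 (·.1) (·.2))]

-- ===== PRECONDITION & SPEC =====
def Spec_compare_md_cobol_2d (md_data : List (String × String)) (cobol_data : List (String × String)) (out : List (String × List (String × String))) : Prop := out = compare_md_cobol_2d_alt md_data cobol_data
instance (md_data : List (String × String)) (cobol_data : List (String × String)) (out : List (String × List (String × String))) : Decidable (Spec_compare_md_cobol_2d md_data cobol_data out) := by unfold Spec_compare_md_cobol_2d; infer_instance

-- ===== CLAIM (what is proved, stated in full; the proofs are below) =====
def Claim_equal_compare_md_cobol_2d : Prop := ∀ (md_data : List (String × String)) (cobol_data : List (String × String)), Dom_compare_md_cobol_2d md_data cobol_data → Spec_compare_md_cobol_2d md_data cobol_data (compare_md_cobol_2d md_data cobol_data)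

-- ===== LEMMAS AND PROOFS =====

-- Python's sorted on pairs of strings (no key) is sorted2 with the two projections,
-- which coincides with PySem.List.sorted keyed by the (injective) lexicographic map.
theorem sorted2_eq_sorted_toLex (xs : List (String × String)) :
    PySem.List.sorted2 xs (fun p => p.1) (fun p => p.2)
      = PySem.List.sorted xs (fun p => toLex p) := by
  rw [PySem.List.sorted_eq_foldl_insertBy]
  unfold PySem.List.sorted2
  simp only []
  congr 1
  funext acc x
  congr 1
  funext a b
  rcases lt_trichotomy a.1 b.1 with h | h | h
  · simp [Prod.Lex.lt_iff, h, lt_asymm h]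
  · simp [Prod.Lex.lt_iff, h]
  · simp [Prod.Lex.lt_iff, h, lt_asymm h, (ne_of_gt h)]

theorem sorted2_congr_perm (l1 l2 : List (String × String)) (h : l1.Perm l2) :
    PySem.List.sorted2 l1 (fun p => p.1) (fun p => p.2)
      = PySem.List.sorted2 l2 (fun p => p.1) (fun p => p.2) := by
  rw [sorted2_eq_sorted_toLex, sorted2_eq_sorted_toLex]
  exact PySem.List.sorted_eq_sorted_of_perm l1 l2 _ (fun a b hab => by simpa using hab) h

-- the md pass: get? after folding inserts of the constant (true, false)
theorem md_fold_get? (md : List (String × String))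
    (d : PySem.Dict (String × String) (Bool × Bool)) (k : String × String) :
    (md.foldl (fun d p => d.insert p (true, false)) d).get? k
      = if k ∈ md then some (true, false) else d.get? k := by
  induction md generalizing d with
  | nil => simp
  | cons p t ih =>
    simp only [List.foldl_cons, ih, PySem.Dict.get?_insert, List.mem_cons]
    by_cases h : k ∈ t <;> by_cases h2 : k = p <;> simp [h, h2]

-- the cobol pass: get? after folding the flag-preserving inserts
theorem cobol_fold_get? (cb : List (String × String))
    (d : PySem.Dict (String × String) (Bool × Bool)) (k : String × String) :
    (cb.foldl (fun d p => d.insert p ((d.getD p (false, false)).1, true)) d).get? k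
      = if k ∈ cb then some ((d.getD k (false, false)).1, true) else d.get? k := by
  induction cb generalizing d with
  | nil => simp
  | cons p t ih =>
    simp only [List.foldl_cons, ih, List.mem_cons]
    by_cases h : k ∈ t <;> by_cases h2 : k = p <;>
      simp [h, h2, PySem.Dict.getD_insert, PySem.Dict.get?_insert]

-- the final flag dict, characterised pointwise
theorem flags_get? (md cb : List (String × String)) (k : String × String) :
    ((cb.foldl (fun d p => d.insert p ((d.getD p (false, false)).1, true))
        (md.foldl (fun d p => d.insert p (true, false)) PySem.Dict.empty))).get? k
      = if k ∈ cb then some (decide (k ∈ md), true)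
        else if k ∈ md then some (true, false) else none := by
  rw [cobol_fold_get?]
  rw [md_fold_get?]
  by_cases hc : k ∈ cb <;> by_cases hm : k ∈ md <;>
    simp [hc, hm, PySem.Dict.getD_eq_get?_getD, md_fold_get?]

-- the classifying sweep is three filters
theorem classify_foldl (l : List ((String × String) × (Bool × Bool)))
    (a b c : List (String × String)) :
    l.foldl
      (fun acc kv =>
        if kv.2.1 && kv.2.2 then (acc.1 ++ [kv.1], acc.2.1, acc.2.2)
        else if kv.2.1 then (acc.1, acc.2.1 ++ [kv.1], acc.2.2)
        else (acc.1, acc.2.1, acc.2.2 ++ [kv.1]))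
      (a, b, c)
      = (a ++ (l.filter (fun kv => kv.2.1 && kv.2.2)).map (·.1),
         b ++ (l.filter (fun kv => kv.2.1 && !kv.2.2)).map (·.1),
         c ++ (l.filter (fun kv => !kv.2.1)).map (·.1)) := by
  induction l generalizing a b c with
  | nil => simp
  | cons kv t ih =>
    cases hb1 : kv.2.1 <;> cases hb2 : kv.2.2 <;>
      simp only [List.foldl_cons, hb1, hb2, Bool.false_and, Bool.true_and, Bool.and_self,
        Bool.false_eq_true, Bool.not_true, Bool.not_false, ↓reduceIte, List.filter_cons] <;>
      rw [ih] <;>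
      simp [List.append_assoc]

-- ===== VERDICT (by name: the statement is the Claim_ definition above) =====
theorem compare_md_cobol_2d_spec : Claim_equal_compare_md_cobol_2d := by
  intro md cb _
  show compare_md_cobol_2d md cb = compare_md_cobol_2d_alt md cb
  unfold compare_md_cobol_2d compare_md_cobol_2d_alt
  dsimp only
  set flags : PySem.Dict (String × String) (Bool × Bool) :=
    cb.foldl (fun d p => d.insert p ((d.getD p (false, false)).1, true))
      (md.foldl (fun d p => d.insert p (true, false)) PySem.Dict.empty) with hflags
  have hkeys : flags.keys = PySem.Set.update (PySem.Set.update ([] : PySem.Set (String × String)) md) cb := by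
    rw [hflags, PySem.Dict.keys_foldl_insert, PySem.Dict.keys_foldl_insert, PySem.Dict.keys_empty]
  have hknodup : flags.keys.Nodup := by
    rw [hkeys]
    exact PySem.Set.nodup_update _ _ (PySem.Set.nodup_update _ _ List.nodup_nil)
  have hmemK : ∀ k, k ∈ flags.keys ↔ k ∈ md ∨ k ∈ cb := by
    intro k
    rw [hkeys, PySem.Set.mem_update, PySem.Set.mem_update]
    simp
  have hitems : flags.items
      = flags.keys.map (fun k => (k, (decide (k ∈ md), decide (k ∈ cb)))) := by
    rw [PySem.Dict.items_eq_map_keys flags hknodup (false, false)]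
    apply List.map_congr_left
    intro k hk
    have hget := flags_get? md cb k
    rw [← hflags] at hget
    rcases (hmemK k).1 hk with hm | hc
    · by_cases hc : k ∈ cb <;>
        simp [PySem.Dict.getD_eq_get?_getD, hget, hm, hc]
    · simp [PySem.Dict.getD_eq_get?_getD, hget, hc]
  rw [classify_foldl, hitems]
  dsimp only
  simp only [List.nil_append]
  -- a filtered projection of the key-value map is a plain filter of the keys
  have hproj : ∀ (p : ((String × String) × (Bool × Bool)) → Bool),
      ((flags.keys.map (fun k => (k, (decide (k ∈ md), decide (k ∈ cb))))).filter p).map (·.1)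
        = flags.keys.filter (fun k => p (k, (decide (k ∈ md), decide (k ∈ cb)))) := by
    intro p
    rw [List.filter_map, List.map_map]
    simp [Function.comp_def]
  have hgen : ∀ (p : ((String × String) × (Bool × Bool)) → Bool)
      (s : List (String × String)), s.Nodup →
      (∀ x, x ∈ s ↔ x ∈ flags.keys ∧ p (x, (decide (x ∈ md), decide (x ∈ cb))) = true) →
      PySem.List.sorted2 s (·.1) (·.2)
        = PySem.List.sorted2
            (((flags.keys.map (fun k => (k, (decide (k ∈ md), decide (k ∈ cb))))).filter p).map (·.1)) (·.1) (·.2) := by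
    intro p s hs hmem
    apply sorted2_congr_perm
    rw [hproj]
    refine (List.perm_ext_iff_of_nodup hs (hknodup.filter _)).2 ?_
    intro x
    rw [hmem x, List.mem_filter]
  have h1 := hgen (fun kv => kv.2.1 && kv.2.2)
    (PySem.Set.inter (PySem.Set.ofList md) (PySem.Set.ofList cb))
    (PySem.Set.nodup_inter _ _ (PySem.Set.nodup_ofList md))
    (by intro x
        simp [PySem.Set.mem_inter, PySem.Set.mem_ofList, hmemK]
        tauto)
  have h2 := hgen (fun kv => kv.2.1 && !kv.2.2)
    (PySem.Set.diff (PySem.Set.ofList md) (PySem.Set.ofList cb))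
    (PySem.Set.nodup_diff _ _ (PySem.Set.nodup_ofList md))
    (by intro x
        simp [PySem.Set.mem_diff, PySem.Set.mem_ofList, hmemK]
        tauto)
  have h3 := hgen (fun kv => !kv.2.1)
    (PySem.Set.diff (PySem.Set.ofList cb) (PySem.Set.ofList md))
    (PySem.Set.nodup_diff _ _ (PySem.Set.nodup_ofList cb))
    (by intro x
        simp [PySem.Set.mem_diff, PySem.Set.mem_ofList, hmemK]
        tauto)
  rw [← h1, ← h2, ← h3]
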